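-- pv_equiv track=rewrite | github.com/ranijames/Big-data_analysis | exon/mutations/plots.py | get_markers
-- ===== SOURCE A (Python) =====
-- import itertools
--
-- def get_markers(clones):
--
--     markers = []
--     c = None
--     for x,group in itertools.groupby(clones, key=lambda x: x.split('-')[0]):
--         if c is None:
--             c = itertools.cycle(['v','8','*', '<', '>'])
--         else:
--             c = itertools.cycle(['o','s','h','d', '*', '8'])
--         for g in group:
--             markers.append(next(c))
--
--     return markers
-- ===== SOURCE B (Python) =====
-- def _rle(keys):
--     # run-length encoding of consecutive equal keys
--     if not keys:
--         return []
--     n = 1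
--     while n < len(keys) and keys[n] == keys[0]:
--         n += 1
--     return [(keys[0], n)] + _rle(keys[n:])
--
-- def get_markers(clones):
--     keys = [x.split('-')[0] for x in clones]
--     out = []
--     for i, (k, n) in enumerate(_rle(keys)):
--         lst = ['v', '8', '*', '<', '>'] if i == 0 else ['o', 's', 'h', 'd', '*', '8']
--         out.extend((lst * (n // len(lst) + 1))[:n])
--     return out
-- ===== Notes on version B (the rewrite author's own statement) =====
-- stated objective: alternative
-- what changed: Replaces the groupby+cycle streaming pass by staged passes: extract prefixes, run-length-encode them recursively, then build each group's markers at once by list repetition and slicing ((lst*(n//len+1))[:n]) instead of per-element next(cycle).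
import Mathlib
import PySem

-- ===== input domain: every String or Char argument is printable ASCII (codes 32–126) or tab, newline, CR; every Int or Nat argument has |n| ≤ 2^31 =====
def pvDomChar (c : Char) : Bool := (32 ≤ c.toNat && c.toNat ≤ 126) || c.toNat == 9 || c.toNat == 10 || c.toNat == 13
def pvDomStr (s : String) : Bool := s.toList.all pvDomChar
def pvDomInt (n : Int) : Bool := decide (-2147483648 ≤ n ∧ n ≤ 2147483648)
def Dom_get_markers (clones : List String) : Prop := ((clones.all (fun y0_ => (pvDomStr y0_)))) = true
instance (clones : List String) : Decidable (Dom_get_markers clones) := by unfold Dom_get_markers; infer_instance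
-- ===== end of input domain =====

-- B replaces groupby+cycle by staged passes: prefix extraction, recursive run-length encoding,
-- then per-group expansion via list repetition and truncation (objective: alternative).

-- x.split('-')[0]: split with '-' always yields a nonempty list, so index 0 is exact
def pvKey (s : String) : String := ((PySem.Str.split? s "-").getD []).headD ""

-- ===== PORT A =====
-- one step of itertools.groupby: length of the run of key k and the remainder
def pvTakeRun (k : String) : List String → Nat × List String
  | [] => (0, [])
  | x :: xs =>
    if pvKey x = k then
      let r := pvTakeRun k xs
      (r.1 + 1, r.2)
    else (0, x :: xs)

theorem pvTakeRun_len (k : String) (xs : List String) : (pvTakeRun k xs).2.length ≤ xs.length := by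
  induction xs with
  | nil => simp [pvTakeRun]
  | cons x xs ih =>
    simp only [pvTakeRun]
    split
    · exact Nat.le_succ_of_le ih
    · simp

-- n successive values of next(c) on itertools.cycle(lst)
def pvCycleTake (lst : List String) (n : Nat) : List String :=
  (List.range n).map (fun i => lst.getD (i % lst.length) "")

-- the groupby loop: first = (c is None); each group's markers come from a fresh cycle
def pvGoA : List String → Bool → List String
  | [], _ => []
  | x :: xs, first =>
    let r := pvTakeRun (pvKey x) xs
    pvCycleTake (if first then ["v", "8", "*", "<", ">"] else ["o", "s", "h", "d", "*", "8"]) (r.1 + 1)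
      ++ pvGoA r.2 false
  termination_by xs _ => xs.length
  decreasing_by exact Nat.lt_succ_of_le (pvTakeRun_len _ _)

def get_markers (clones : List String) : List String := pvGoA clones true

-- ===== PORT B =====
-- the while loop of _rle: n - 1 = number of leading keys equal to keys[0] in keys[1:]
def pvRunLen (k : String) : List String → Nat
  | [] => 0
  | x :: xs => if x = k then pvRunLen k xs + 1 else 0

-- _rle: [(keys[0], n)] + _rle(keys[n:]); keys[n:] on k::ks is ks.drop (n-1)
def pvRle : List String → List (String × Nat)
  | [] => []
  | k :: ks => (k, pvRunLen k ks + 1) :: pvRle (ks.drop (pvRunLen k ks))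
  termination_by ks => ks.length
  decreasing_by simp only [List.length_drop, List.length_cons]; omega

-- the enumerate loop of get_markers; counts are nonneg so Nat division matches Python //,
-- and the slice [:n] with n ≥ 0 is List.take
def pvExpand : List (String × Nat) → Nat → List String
  | [], _ => []
  | (_, n) :: rs, i =>
    let lst := if i = 0 then ["v", "8", "*", "<", ">"] else ["o", "s", "h", "d", "*", "8"]
    ((List.replicate (n / lst.length + 1) lst).flatten.take n) ++ pvExpand rs (i + 1)

def get_markers_alt (clones : List String) : List String :=
  pvExpand (pvRle (clones.map pvKey)) 0

-- ===== PRECONDITION & SPEC =====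
def Spec_get_markers (clones : List String) (out : List String) : Prop := out = get_markers_alt clones
instance (clones : List String) (out : List String) : Decidable (Spec_get_markers clones out) := by unfold Spec_get_markers; infer_instance

-- ===== CLAIM (what is proved, stated in full; the proofs are below) =====
def Claim_equal_get_markers : Prop := ∀ (clones : List String), Dom_get_markers clones → Spec_get_markers clones (get_markers clones)

-- ===== LEMMAS AND PROOFS =====

theorem pvRange_map_getD (lst : List String) :
    (List.range lst.length).map (fun i => lst.getD i "") = lst := by
  apply List.ext_getElem
  · simp
  · intro i h1 h2
    simp [List.getD_eq_getElem?_getD, h2]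

theorem pvFlatten_replicate (lst : List String) (m : Nat) :
    (List.replicate m lst).flatten =
      (List.range (m * lst.length)).map (fun i => lst.getD (i % lst.length) "") := by
  induction m with
  | zero => simp
  | succ m ih =>
    have hsplit : (m + 1) * lst.length = lst.length + m * lst.length := by ring
    rw [List.replicate_succ, List.flatten_cons, ih, hsplit, List.range_add, List.map_append]
    congr 1
    · conv_lhs => rw [← pvRange_map_getD lst]
      apply List.map_congr_left
      intro i hi
      simp only [List.mem_range] at hi
      rw [Nat.mod_eq_of_lt hi]
    · rw [List.map_map]
      apply List.map_congr_left
      intro i _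
      simp only [Function.comp]
      rw [Nat.add_mod_left]

theorem pvTake_flatten_replicate (lst : List String) (h : lst ≠ []) (n : Nat) :
    (List.replicate (n / lst.length + 1) lst).flatten.take n = pvCycleTake lst n := by
  have hL : 0 < lst.length := List.length_pos_iff.mpr h
  have hle : n ≤ (n / lst.length + 1) * lst.length := by
    have := Nat.div_add_mod n lst.length
    have := Nat.mod_lt n hL
    nlinarith
  rw [pvFlatten_replicate, ← List.map_take, List.take_range, Nat.min_eq_left hle]
  rfl

-- the RLE of the mapped keys mirrors one groupby step on the clones
theorem pvRunLen_map (k : String) (xs : List String) :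
    pvRunLen k (xs.map pvKey) = (pvTakeRun k xs).1 ∧
      (xs.map pvKey).drop (pvRunLen k (xs.map pvKey)) = (pvTakeRun k xs).2.map pvKey := by
  induction xs with
  | nil => simp [pvRunLen, pvTakeRun]
  | cons x xs ih =>
    by_cases hk : pvKey x = k
    · simp only [List.map_cons, pvRunLen, pvTakeRun, hk, if_pos trivial]
      exact ⟨by rw [ih.1], by simpa using ih.2⟩
    · simp [pvRunLen, pvTakeRun, hk]

theorem pvRle_nil : pvRle [] = [] := by rw [pvRle]

theorem pvRle_cons (k : String) (ks : List String) :
    pvRle (k :: ks) = (k, pvRunLen k ks + 1) :: pvRle (ks.drop (pvRunLen k ks)) := by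
  rw [pvRle]

theorem pvExpand_rle (N : Nat) : ∀ (xs : List String) (i : Nat), xs.length ≤ N →
    pvExpand (pvRle (xs.map pvKey)) i = pvGoA xs (decide (i = 0)) := by
  induction N with
  | zero =>
    intro xs i h
    have : xs = [] := List.eq_nil_of_length_eq_zero (Nat.le_zero.mp h)
    subst this
    simp [pvRle_nil, pvExpand, pvGoA]
  | succ N ih =>
    intro xs i h
    cases xs with
    | nil => simp [pvRle_nil, pvExpand, pvGoA]
    | cons x xs =>
      have hr := pvRunLen_map (pvKey x) xs
      simp only [List.map_cons, pvRle_cons, pvExpand, pvGoA]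
      have h2 : List.drop (pvTakeRun (pvKey x) xs).1 (List.map pvKey xs) =
          List.map pvKey (pvTakeRun (pvKey x) xs).2 := hr.1 ▸ hr.2
      rw [hr.1, h2]
      have hrec : (pvTakeRun (pvKey x) xs).2.length ≤ N := by
        have := pvTakeRun_len (pvKey x) xs
        simp only [List.length_cons] at h
        omega
      have := ih (pvTakeRun (pvKey x) xs).2 (i + 1) hrec
      simp only [Nat.succ_ne_zero, decide_false] at this ⊢
      rw [this]
      congr 1
      by_cases hi : i = 0
      · subst hi
        rw [pvTake_flatten_replicate _ (by simp)]
        simp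
      · simp only [hi, decide_false, Bool.false_eq_true, if_false]
        rw [pvTake_flatten_replicate _ (by simp)]

-- ===== VERDICT (by name: the statement is the Claim_ definition above) =====
theorem get_markers_spec : Claim_equal_get_markers := by
  intro clones _
  unfold Spec_get_markers get_markers get_markers_alt
  exact (pvExpand_rle clones.length clones 0 le_rfl).symm
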